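-- pv_equiv track=rewrite | github.com/miliar/Code_Jam_Webscraper | solutions_python/Problem_181/1832.py | compute
-- ===== SOURCE A (Python) =====
-- def compute(word):
--     result = [word[0]]
--     for i in range(1, len(word)):
--         alpha = word[i]
--         if alpha >= result[0]:
--             result.insert(0, alpha)
--         else:
--             result.append(alpha)
--     return ''.join(result)
-- ===== SOURCE B (Python) =====
-- def compute(word):
--     # Staged: build the prefix-maximum table, then two comprehensions select
--     # record chars (reversed front) and non-record chars (tail).
--     pm = []
--     m = word[0]
--     for c in word:
--         if c > m:
--             m = c
--         pm.append(m)
--     front = [c for c, m in zip(word, pm) if c == m]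
--     front.reverse()
--     back = [c for c, m in zip(word, pm) if c != m]
--     return ''.join(front + back)
-- ===== Notes on version B (the rewrite author's own statement) =====
-- stated objective: faster
-- what changed: Replaces A's online build with repeated O(n) list.insert(0,...) by staged passes: compute the prefix-maximum table once, then filter record characters (c == pm[i]) into a reversed front and the rest into a tail.
import Mathlib
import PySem

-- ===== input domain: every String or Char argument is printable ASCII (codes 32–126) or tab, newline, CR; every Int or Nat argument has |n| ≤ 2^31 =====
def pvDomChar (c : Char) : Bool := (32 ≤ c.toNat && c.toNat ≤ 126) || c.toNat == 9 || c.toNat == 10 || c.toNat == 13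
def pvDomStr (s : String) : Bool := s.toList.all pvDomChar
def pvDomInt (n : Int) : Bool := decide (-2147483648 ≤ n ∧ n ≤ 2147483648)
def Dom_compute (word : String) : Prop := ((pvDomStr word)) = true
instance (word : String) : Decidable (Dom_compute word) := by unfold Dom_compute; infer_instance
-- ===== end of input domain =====

-- B replaces A's online insert(0)/append build by staged passes: a prefix-maximum
-- table, then two filters (record chars reversed in front, the rest as tail).

-- ===== PORT A =====
def computeStep (res : List Char) (c : Char) : List Char :=
  match res with
  | [] => [c]          -- unreachable: res is never empty
  | r :: _ => if r ≤ c then c :: res else res ++ [c]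

def compute (word : String) : String :=
  match word.toList with
  | [] => ""           -- outside Pre_: Python raises IndexError
  | c :: rest => String.ofList (rest.foldl computeStep [c])

-- ===== PORT B =====
def pmStep (st : Char × List Char) (d : Char) : Char × List Char :=
  let m := if st.1 < d then d else st.1
  (m, st.2 ++ [m])

def compute_alt (word : String) : String :=
  match word.toList with
  | [] => ""           -- outside Pre_: Python raises IndexError
  | c :: _ =>
    let cs := word.toList
    let pm := (cs.foldl pmStep (c, [])).2
    let front := ((cs.zip pm).filter (fun p => p.1 == p.2)).map Prod.fst
    let back := ((cs.zip pm).filter (fun p => p.1 != p.2)).map Prod.fst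
    String.ofList (front.reverse ++ back)

-- ===== PRECONDITION & SPEC =====
-- Pre_ excludes only the empty string, on which A raises IndexError (word[0]).
def Pre_compute (word : String) : Prop := word ≠ ""
instance (word : String) : Decidable (Pre_compute word) := by unfold Pre_compute; infer_instance
def pvWitness_compute : String := "ba"
def Spec_compute (word : String) (out : String) : Prop := out = compute_alt word
instance (word : String) (out : String) : Decidable (Spec_compute word out) := by unfold Spec_compute; infer_instance

-- ===== CLAIM (what is proved, stated in full; the proofs are below) =====
def Claim_equal_compute : Prop := ∀ (word : String), Dom_compute word → Pre_compute word → Spec_compute word (compute word)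

-- ===== LEMMAS AND PROOFS =====
-- record chars (c ≥ running max), carrying the new max when a record occurs
def recsAux (mx : Char) : List Char → List Char
  | [] => []
  | c :: cs => if mx ≤ c then c :: recsAux c cs else recsAux mx cs

-- non-record chars
def nonrecsAux (mx : Char) : List Char → List Char
  | [] => []
  | c :: cs => if mx ≤ c then nonrecsAux c cs else c :: nonrecsAux mx cs

-- running maximum of the whole list
def maxA (mx : Char) : List Char → Char
  | [] => mx
  | c :: cs => maxA (if mx < c then c else mx) cs

-- prefix-maximum table
def pmList (mx : Char) : List Char → List Char
  | [] => []
  | c :: cs =>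
    let m := if mx < c then c else mx
    m :: pmList m cs

-- A's loop: state is mx :: rups ++ downs; records pile up reversed at the front.
lemma compute_inv (chars : List Char) : ∀ (mx : Char) (rups downs : List Char),
    chars.foldl computeStep (mx :: (rups ++ downs)) =
      (recsAux mx chars).reverse ++ (mx :: rups) ++ downs ++ nonrecsAux mx chars := by
  induction chars with
  | nil => intro mx rups downs; simp [recsAux, nonrecsAux]
  | cons c cs ih =>
    intro mx rups downs
    simp only [List.foldl_cons, computeStep]
    by_cases h : mx ≤ c
    · simp only [h, if_pos, recsAux, nonrecsAux]
      have := ih c (mx :: rups) downs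
      simp only [List.cons_append] at this ⊢
      rw [this]; simp
    · simp only [h, if_neg, not_false_iff, recsAux, nonrecsAux]
      have := ih mx rups (downs ++ [c])
      simp only [List.cons_append, List.append_assoc] at this ⊢
      simpa using this

-- B's first loop computes the prefix-maximum table.
lemma pm_foldl (cs : List Char) : ∀ (mx : Char) (acc : List Char),
    cs.foldl pmStep (mx, acc) = (maxA mx cs, acc ++ pmList mx cs) := by
  induction cs with
  | nil => intro mx acc; simp [maxA, pmList]
  | cons c cs ih =>
    intro mx acc
    simp only [List.foldl_cons, pmStep, maxA, pmList]
    rw [ih]; simp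

-- the "record" comprehension over (char, prefix max) pairs is recsAux
lemma filter_eq_recs (cs : List Char) : ∀ (mx : Char),
    ((cs.zip (pmList mx cs)).filter (fun p => p.1 == p.2)).map Prod.fst = recsAux mx cs := by
  induction cs with
  | nil => intro mx; simp [pmList, recsAux]
  | cons c cs ih =>
    intro mx
    simp only [pmList, List.zip_cons_cons, List.filter_cons]
    by_cases h : mx < c
    · simp only [h, if_pos, recsAux]
      have hle : mx ≤ c := le_of_lt h
      simp [hle, ih]
    · simp only [h, if_neg, not_false_iff]
      by_cases he : c = mx
      · subst he
        simp [recsAux, ih]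
      · have hne : (c == mx) = false := by simp [he]
        have hnle : ¬ mx ≤ c := by
          intro hle
          exact he (le_antisymm (not_lt.mp h) hle)
        simp [hne, recsAux, hnle, ih]

-- the "non-record" comprehension is nonrecsAux
lemma filter_eq_nonrecs (cs : List Char) : ∀ (mx : Char),
    ((cs.zip (pmList mx cs)).filter (fun p => p.1 != p.2)).map Prod.fst = nonrecsAux mx cs := by
  induction cs with
  | nil => intro mx; simp [pmList, nonrecsAux]
  | cons c cs ih =>
    intro mx
    simp only [pmList, List.zip_cons_cons, List.filter_cons]
    by_cases h : mx < c
    · have hle : mx ≤ c := le_of_lt h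
      simp [h, nonrecsAux, hle, ih]
    · by_cases he : c = mx
      · subst he
        simp [nonrecsAux, ih]
      · have hnle : ¬ mx ≤ c := by
          intro hle
          exact he (le_antisymm (not_lt.mp h) hle)
        have hcl : c ≤ mx := not_lt.mp h
        simp [he, nonrecsAux, hnle, ih, if_neg h]

-- ===== VERDICT (by name: the statement is the Claim_ definition above) =====
theorem compute_spec : Claim_equal_compute := by
  intro word _ _
  unfold Spec_compute compute compute_alt
  cases h : word.toList with
  | nil => rfl
  | cons c rest =>
    simp only [pm_foldl, List.nil_append]
    have hpm : pmList c (c :: rest) = c :: pmList c rest := by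
      simp [pmList]
    rw [hpm]
    simp only [List.zip_cons_cons, List.filter_cons, beq_self_eq_true, if_pos, bne_self_eq_false,
      Bool.false_eq_true, if_neg, not_false_iff, List.map_cons]
    rw [filter_eq_recs, filter_eq_nonrecs]
    have := compute_inv rest c [] []
    simp only [List.append_nil] at this
    rw [this]
    simp
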